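-- pv_equiv track=rewrite | github.com/workforce-data-initiative/skills-ml | skills_ml/algorithms/nlp/__init__.py | split_by_bullets
-- ===== SOURCE A (Python) =====
-- from typing import List, Set, Generator, Dict, Pattern, Tuple
-- from collections import namedtuple
--
-- BULLET_CHARACTERS = ['+', '*', '-']
--
-- Span = namedtuple("Span", ["text", "start_index"])
--
-- def split_by_bullets(sentence: str) -> List[Span]:
--     """Split sentence by bullet characters
--
--     Args:
--         sentence (str)
--
--     Returns: List of Span objects representing the text inbetween bullets, with both text and start indices
--     """
--     units = []
--     for bullet_char in BULLET_CHARACTERS: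
--         index = 0
--         padded_bullet = bullet_char + ' '
--         if sentence.count(padded_bullet) > 1:
--             for i, fragment in enumerate(sentence.split(padded_bullet)):
--                 if i > 0:
--                     units.append(Span(text=padded_bullet + fragment, start_index=index))
--                     index += len(padded_bullet + fragment)
--                 else:
--                     units.append(Span(text=fragment, start_index=index))
--                     index += len(fragment)
--             return units
--     units.append(Span(text=sentence, start_index=0))
--     return units
-- ===== SOURCE B (Python) =====
-- from typing import List
-- from collections import namedtuple
--
-- BULLET_CHARACTERS = ['+', '*', '-']
--
-- Span = namedtuple("Span", ["text", "start_index"])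
--
-- def split_by_bullets(sentence: str) -> List[Span]:
--     """Split sentence by bullet characters (find-loop over absolute match
--     positions, then pairwise slicing between boundaries)."""
--     for bullet_char in BULLET_CHARACTERS:
--         padded_bullet = bullet_char + ' '
--         if sentence.count(padded_bullet) > 1:
--             boundaries = [0]
--             pos = sentence.find(padded_bullet)
--             while pos != -1:
--                 boundaries.append(pos)
--                 pos = sentence.find(padded_bullet, pos + len(padded_bullet))
--             boundaries.append(len(sentence))
--             spans = []
--             for start, end in zip(boundaries, boundaries[1:]):
--                 spans.append(Span(text=sentence[start:end], start_index=start))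
--             return spans
--     return [Span(text=sentence, start_index=0)]
-- ===== Notes on version B (the rewrite author's own statement) =====
-- stated objective: alternative
-- what changed: Instead of split()-fragments with a running length accumulator, B collects the absolute start positions of each padded-bullet occurrence with a str.find loop and builds the spans by pairwise slicing between consecutive boundaries.
import Mathlib
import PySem

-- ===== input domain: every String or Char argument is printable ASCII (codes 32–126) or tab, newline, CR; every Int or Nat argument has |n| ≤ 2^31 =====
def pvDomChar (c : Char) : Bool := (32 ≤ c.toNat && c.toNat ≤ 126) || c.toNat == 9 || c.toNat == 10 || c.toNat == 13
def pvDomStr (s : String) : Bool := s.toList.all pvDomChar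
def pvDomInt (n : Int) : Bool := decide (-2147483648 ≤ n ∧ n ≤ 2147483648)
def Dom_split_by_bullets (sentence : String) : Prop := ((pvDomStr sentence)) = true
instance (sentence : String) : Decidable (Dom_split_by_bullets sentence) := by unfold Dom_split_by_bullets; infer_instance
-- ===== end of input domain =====

-- B replaces A's split()+running-length accumulation by a find-loop collecting absolute
-- match positions and pairwise slicing between consecutive boundaries (objective: alternative).

-- ===== PORT A =====
def pvBullets : List Char := ['+', '*', '-']

-- the 'for i, fragment in enumerate(sentence.split(padded_bullet))' loop of A
def pvAInner (padded : List Char) (pieces : List (List Char)) : List (String × Int) :=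
  ((PySem.List.enumerate pieces 0).foldl
    (fun (st : List (String × Int) × Int) (p : Int × List Char) =>
      if p.1 > 0 then
        (st.1 ++ [(String.ofList (padded ++ p.2), st.2)], st.2 + PySem.List.len (padded ++ p.2))
      else
        (st.1 ++ [(String.ofList p.2, st.2)], st.2 + PySem.List.len p.2))
    ([], 0)).1

-- the 'for bullet_char in BULLET_CHARACTERS' loop of A
def pvALoop (s : List Char) : List Char → List (String × Int)
  | [] => [(String.ofList s, 0)]
  | bc :: rest =>
    let padded := [bc, ' ']
    if PySem.Chars.count s padded > 1 then
      pvAInner padded (PySem.Chars.splitOn s padded)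
    else pvALoop s rest

def split_by_bullets (sentence : String) : List (String × Int) :=
  pvALoop sentence.toList pvBullets

-- ===== PORT B =====
-- the 'while pos != -1' find-loop of B collecting absolute match positions
def pvCollect (s padded : List Char) : Nat → Int → List Int → List Int
  | 0, _, acc => acc
  | fuel + 1, pos, acc =>
    if pos = -1 then acc
    else pvCollect s padded fuel
          (PySem.Chars.findFrom s padded (pos + PySem.List.len padded)) (acc ++ [pos])

-- the 'for start, end in zip(boundaries, boundaries[1:])' loop of B
def pvBSpans (s : List Char) (bs : List Int) : List (String × Int) :=
  (bs.zip bs.tail).foldl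
    (fun spans p => spans ++ [(String.ofList (PySem.List.slice s (some p.1) (some p.2)), p.1)]) []

def pvBLoop (s : List Char) : List Char → List (String × Int)
  | [] => [(String.ofList s, 0)]
  | bc :: rest =>
    let padded := [bc, ' ']
    if PySem.Chars.count s padded > 1 then
      let bs := pvCollect s padded (s.length + 1) (PySem.Chars.find s padded) [(0 : Int)]
      pvBSpans s (bs ++ [(s.length : Int)])
    else pvBLoop s rest

def split_by_bullets_alt (sentence : String) : List (String × Int) :=
  pvBLoop sentence.toList pvBullets

-- ===== PRECONDITION & SPEC =====
def Spec_split_by_bullets (sentence : String) (out : List (String × Int)) : Prop := out = split_by_bullets_alt sentence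
instance (sentence : String) (out : List (String × Int)) : Decidable (Spec_split_by_bullets sentence out) := by unfold Spec_split_by_bullets; infer_instance

-- ===== CLAIM (what is proved, stated in full; the proofs are below) =====
def Claim_equal_split_by_bullets : Prop := ∀ (sentence : String), Dom_split_by_bullets sentence → Spec_split_by_bullets sentence (split_by_bullets sentence)

-- ===== LEMMAS AND PROOFS =====

-- accumulator-free view of Chars.splitOn.go: glue a prefix onto the first piece
def pvGlue (x : List Char) : List (List Char) → List (List Char)
  | [] => [x]
  | p :: ps => (x ++ p) :: ps

-- pure, accumulator-free split on separator pb (pb nonempty)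
def pvPureSplit (pb : List Char) (h : 0 < pb.length) : List Char → List (List Char)
  | [] => [[]]
  | c :: t =>
    if pb.isPrefixOf (c :: t) then
      [] :: pvPureSplit pb h (List.drop pb.length (c :: t))
    else pvGlue [c] (pvPureSplit pb h t)
termination_by s => s.length
decreasing_by
  · simp; omega
  · simp

-- absolute start positions of the successive non-overlapping matches of pb
def pvOccs (pb : List Char) (h : 0 < pb.length) (s : List Char) : List Nat :=
  if hk : PySem.Chars.find s pb < 0 then []
  else
    (PySem.Chars.find s pb).toNat ::
      (pvOccs pb h (List.drop ((PySem.Chars.find s pb).toNat + pb.length) s)).map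
        (· + ((PySem.Chars.find s pb).toNat + pb.length))
termination_by s.length
decreasing_by
  have h0 : 0 ≤ PySem.Chars.find s pb := by omega
  have hinf := (PySem.Chars.find_nonneg_iff s pb).mp h0
  have hlen : pb.length ≤ s.length := hinf.length_le
  simp
  omega

-- list-level span builders
def pvAtailL (pb : List Char) : List (List Char) → Int → List (List Char × Int)
  | [], _ => []
  | p :: ps, idx => (pb ++ p, idx) :: pvAtailL pb ps (idx + (pb.length : Int) + (p.length : Int))

def pvAheadL (pb : List Char) : List (List Char) → Int → List (List Char × Int)
  | [], _ => []
  | p :: ps, idx => (p, idx) :: pvAtailL pb ps (idx + (p.length : Int))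

def pvPairL (S : List Char) (bs : List Int) : List (List Char × Int) :=
  (bs.zip bs.tail).map (fun p => (PySem.List.slice S (some p.1) (some p.2), p.1))

theorem pvPureSplit_ne_nil (pb : List Char) (h : 0 < pb.length) (s : List Char) :
    pvPureSplit pb h s ≠ [] := by
  cases s with
  | nil => simp [pvPureSplit]
  | cons c t =>
    rw [pvPureSplit]
    split
    · simp
    · cases pvPureSplit pb h t <;> simp [pvGlue]

theorem pvFind_eq_of (s pb : List Char) (m : Nat) (hm : pb <+: List.drop m s)
    (hmin : ∀ i < m, ¬ pb <+: List.drop i s) : PySem.Chars.find s pb = (m : Int) := by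
  have hinf : pb <:+: s := hm.isInfix.trans (List.drop_suffix m s).isInfix
  have h0 : 0 ≤ PySem.Chars.find s pb := (PySem.Chars.find_nonneg_iff s pb).mpr hinf
  obtain ⟨hpre, hmin'⟩ := PySem.Chars.find_spec h0
  rcases Nat.lt_trichotomy (PySem.Chars.find s pb).toNat m with hlt | heq | hgt
  · exact absurd hpre (hmin _ hlt)
  · omega
  · exact absurd hm (hmin' m hgt)

theorem pvFindSplit (pb : List Char) (h : 0 < pb.length) (s : List Char) :
    pvPureSplit pb h s =
      if PySem.Chars.find s pb < 0 then [s]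
      else List.take (PySem.Chars.find s pb).toNat s ::
           pvPureSplit pb h (List.drop ((PySem.Chars.find s pb).toNat + pb.length) s) := by
  suffices H : ∀ (n : Nat) (s : List Char), s.length ≤ n →
      pvPureSplit pb h s =
        if PySem.Chars.find s pb < 0 then [s]
        else List.take (PySem.Chars.find s pb).toNat s ::
             pvPureSplit pb h (List.drop ((PySem.Chars.find s pb).toNat + pb.length) s) from
    H s.length s le_rfl
  intro n
  induction n with
  | zero =>
    intro s hs
    have hsnil : s = [] := List.eq_nil_of_length_eq_zero (Nat.le_zero.mp hs)
    subst hsnil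
    have hf : PySem.Chars.find [] pb = -1 := by
      rw [PySem.Chars.find_eq_neg_one_iff]
      simp [List.infix_nil]
      exact List.ne_nil_of_length_pos h
    rw [hf]
    simp [pvPureSplit]
  | succ n ih =>
    intro s hs
    cases s with
    | nil =>
      have hf : PySem.Chars.find [] pb = -1 := by
        rw [PySem.Chars.find_eq_neg_one_iff]
        simp [List.infix_nil]
        exact List.ne_nil_of_length_pos h
      rw [hf]
      simp [pvPureSplit]
    | cons c t =>
      by_cases hp : pb <+: (c :: t)
      · -- bullet at position 0
        have hf : PySem.Chars.find (c :: t) pb = ((0 : Nat) : Int) := by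
          apply pvFind_eq_of
          · simpa using hp
          · omega
        rw [pvPureSplit, if_pos (List.isPrefixOf_iff_prefix.mpr hp), hf]
        simp
      · rw [pvPureSplit, if_neg (by simpa [List.isPrefixOf_iff_prefix] using hp)]
        by_cases hft : PySem.Chars.find t pb < 0
        · -- no occurrence at all
          have hft' : PySem.Chars.find t pb = -1 := by
            have := PySem.Chars.neg_one_le_find t pb; omega
          have hf : PySem.Chars.find (c :: t) pb = -1 := by
            rw [PySem.Chars.find_eq_neg_one_iff]
            rw [List.infix_cons_iff, not_or]
            exact ⟨hp, (PySem.Chars.find_eq_neg_one_iff t pb).mp hft'⟩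
          rw [ih t (by simpa using hs), if_pos hft, hf]
          simp [pvGlue]
        · -- first occurrence in t at K; in c :: t it is at K + 1
          have h0 : 0 ≤ PySem.Chars.find t pb := by omega
          obtain ⟨hpre, hmin⟩ := PySem.Chars.find_spec h0
          set K := (PySem.Chars.find t pb).toNat with hK
          have hf : PySem.Chars.find (c :: t) pb = ((K + 1 : Nat) : Int) := by
            apply pvFind_eq_of
            · simpa [List.drop_succ_cons] using hpre
            · intro i hi
              match i with
              | 0 => simpa using hp
              | (j + 1) =>
                rw [List.drop_succ_cons]
                exact hmin j (by omega)
          rw [ih t (by simpa using hs), if_neg hft, hf, if_neg (by omega)]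
          simp only [Int.toNat_natCast, List.take_succ_cons]
          have harith : K + 1 + pb.length = (K + pb.length) + 1 := by omega
          rw [harith, List.drop_succ_cons]
          simp [pvGlue, ← hK]

theorem pvGo_eq (pb : List Char) (h : 0 < pb.length) :
    ∀ (fuel : Nat) (l cur : List Char) (accl : List (List Char)),
      l.length < fuel → PySem.Chars.splitOn.go pb fuel l cur accl =
        accl.reverse ++ pvGlue cur.reverse (pvPureSplit pb h l) := by
  intro fuel
  induction fuel with
  | zero => intro l cur accl hl; omega
  | succ fuel ih =>
    intro l cur accl hl
    cases l with
    | nil =>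
      show ((cur.reverse :: accl).reverse : List (List Char)) = _
      simp [pvPureSplit, pvGlue]
    | cons c t =>
      show (if pb.isPrefixOf (c :: t) then
              PySem.Chars.splitOn.go pb fuel (List.drop pb.length (c :: t)) [] (cur.reverse :: accl)
            else PySem.Chars.splitOn.go pb fuel t (c :: cur) accl) = _
      by_cases hp : pb.isPrefixOf (c :: t)
      · rw [if_pos hp]
        rw [ih _ _ _ (by simp at hl ⊢; omega)]
        rw [pvPureSplit, if_pos hp]
        cases hps : pvPureSplit pb h (List.drop pb.length (c :: t)) with
        | nil => exact absurd hps (pvPureSplit_ne_nil pb h _)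
        | cons p ps => simp [pvGlue]
      · rw [if_neg hp]
        rw [ih _ _ _ (by simp at hl ⊢; omega)]
        rw [pvPureSplit, if_neg hp]
        cases hps : pvPureSplit pb h t with
        | nil => exact absurd hps (pvPureSplit_ne_nil pb h _)
        | cons p ps => simp [pvGlue]

theorem pvSplitOn_eq (pb : List Char) (h : 0 < pb.length) (s : List Char) :
    PySem.Chars.splitOn s pb = pvPureSplit pb h s := by
  show PySem.Chars.splitOn.go pb (s.length + 1) s [] [] = _
  rw [pvGo_eq pb h (s.length + 1) s [] [] (by omega)]
  cases hps : pvPureSplit pb h s with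
  | nil => exact absurd hps (pvPureSplit_ne_nil pb h s)
  | cons p ps => simp [pvGlue]

theorem pvCollect_eq (S pb : List Char) (h : 0 < pb.length) :
    ∀ (fuel : Nat) (j : Nat) (acc : List Int), j ≤ S.length → S.length + 1 - j ≤ fuel →
      pvCollect S pb fuel (PySem.Chars.findFrom S pb (j : Int)) acc =
        acc ++ (pvOccs pb h (List.drop j S)).map (fun m => ((j + m : Nat) : Int)) := by
  intro fuel
  induction fuel with
  | zero => intro j acc hj hf; omega
  | succ fuel ih =>
    intro j acc hj hf
    rw [PySem.Chars.findFrom_natCast S pb j hj]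
    by_cases hF : PySem.Chars.find (List.drop j S) pb = -1
    · rw [if_pos hF]
      show (if (-1 : Int) = -1 then acc else _) = _
      rw [if_pos rfl, pvOccs, dif_pos (by rw [hF]; norm_num)]
      simp
    · rw [if_neg hF]
      have h0 : 0 ≤ PySem.Chars.find (List.drop j S) pb := by
        have := PySem.Chars.neg_one_le_find (List.drop j S) pb; omega
      obtain ⟨hpre, _⟩ := PySem.Chars.find_spec h0
      set K := (PySem.Chars.find (List.drop j S) pb).toNat with hK
      have hKe : PySem.Chars.find (List.drop j S) pb = (K : Int) := by omega
      have hKlen : K + pb.length ≤ S.length - j := by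
        have h1 := hpre.length_le
        simp [List.length_drop] at h1
        omega
      rw [hKe]
      show pvCollect S pb fuel
          (PySem.Chars.findFrom S pb ((j : Int) + (K : Int) + PySem.List.len pb))
          (acc ++ [(j : Int) + (K : Int)]) = _
      rw [PySem.List.len_eq]
      have hcast : (j : Int) + (K : Int) + (pb.length : Int) = ((j + K + pb.length : Nat) : Int) := by
        push_cast; ring
      rw [hcast, ih (j + K + pb.length) _ (by omega) (by omega)]
      have hdd : List.drop (K + pb.length) (List.drop j S) = List.drop (j + K + pb.length) S := by
        rw [List.drop_drop]
        congr 1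
        omega
      have hocc : pvOccs pb h (List.drop j S) =
          K :: (pvOccs pb h (List.drop (j + K + pb.length) S)).map (· + (K + pb.length)) := by
        rw [pvOccs, dif_neg (by omega : ¬ PySem.Chars.find (List.drop j S) pb < 0), ← hK, hdd]
      rw [hocc]
      simp only [List.map_cons, List.map_map, List.append_assoc, List.cons_append,
        List.nil_append]
      congr 1
      congr 1
      apply List.map_congr_left
      intro a _
      simp only [Function.comp_apply]
      push_cast
      ring

theorem pvPairL_cons (S : List Char) (a b : Int) (r : List Int) :
    pvPairL S (a :: b :: r) =
      (PySem.List.slice S (some a) (some b), a) :: pvPairL S (b :: r) := by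
  simp [pvPairL]

theorem pvKeyNone (S pb : List Char) (h : 0 < pb.length) (j : Nat) (hj : j ≤ S.length)
    (hF : PySem.Chars.find (List.drop j S) pb < 0) :
    pvAheadL pb (pvPureSplit pb h (List.drop j S)) (j : Int) =
    pvPairL S (((j : Nat) : Int) ::
      ((pvOccs pb h (List.drop j S)).map (fun m => ((j + m : Nat) : Int)) ++
        [((S.length : Nat) : Int)])) := by
  rw [pvFindSplit pb h (List.drop j S), if_pos hF, pvOccs, dif_pos hF]
  have hsl : PySem.List.slice S (some ((j : Nat) : Int)) (some ((S.length : Nat) : Int)) =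
      List.drop j S := by
    rw [PySem.List.slice_natCast]
    exact List.take_of_length_le (by simp)
  simp [pvAheadL, pvAtailL, pvPairL, hsl]

theorem pvKey (S pb : List Char) (h : 0 < pb.length) :
    ∀ (n : Nat) (j : Nat), j ≤ S.length → S.length - j ≤ n →
      pvAheadL pb (pvPureSplit pb h (List.drop j S)) (j : Int) =
      pvPairL S (((j : Nat) : Int) ::
        ((pvOccs pb h (List.drop j S)).map (fun m => ((j + m : Nat) : Int)) ++
          [((S.length : Nat) : Int)])) := by
  intro n
  induction n with
  | zero =>
    intro j hj hn
    apply pvKeyNone S pb h j hj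
    rw [List.drop_eq_nil_iff.mpr (by omega)]
    have hf : PySem.Chars.find [] pb = -1 := by
      rw [PySem.Chars.find_eq_neg_one_iff, List.infix_nil]
      exact List.ne_nil_of_length_pos h
    omega
  | succ n ih =>
    intro j hj hn
    by_cases hF : PySem.Chars.find (List.drop j S) pb < 0
    · exact pvKeyNone S pb h j hj hF
    · have h0 : 0 ≤ PySem.Chars.find (List.drop j S) pb := by omega
      obtain ⟨hpre, -⟩ := PySem.Chars.find_spec h0
      set K := (PySem.Chars.find (List.drop j S) pb).toNat with hK
      have hKlen : K + pb.length ≤ S.length - j := by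
        have h1 := hpre.length_le
        simp [List.length_drop] at h1
        omega
      have hdd : List.drop (K + pb.length) (List.drop j S) = List.drop (j + K + pb.length) S := by
        rw [List.drop_drop]; congr 1; omega
      have hps' : pvPureSplit pb h (List.drop j S) =
          List.take K (List.drop j S) :: pvPureSplit pb h (List.drop (j + K + pb.length) S) := by
        rw [pvFindSplit pb h (List.drop j S), if_neg hF, ← hK, hdd]
      have hocc : pvOccs pb h (List.drop j S) =
          K :: (pvOccs pb h (List.drop (j + K + pb.length) S)).map (· + (K + pb.length)) := by
        rw [pvOccs, dif_neg hF, ← hK, hdd]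
      have hIH := ih (j + K + pb.length) (by omega) (by omega)
      cases hps0 : pvPureSplit pb h (List.drop (j + K + pb.length) S) with
      | nil => exact absurd hps0 (pvPureSplit_ne_nil pb h _)
      | cons p0 rest =>
        obtain ⟨N, bs'', hbs, hN⟩ :
            ∃ (N : Nat) (bs'' : List Int),
              (pvOccs pb h (List.drop (j + K + pb.length) S)).map
                  (fun m => ((j + K + pb.length + m : Nat) : Int)) ++ [((S.length : Nat) : Int)]
                = ((N : Nat) : Int) :: bs'' ∧ j + K + pb.length ≤ N := by
          cases hos : pvOccs pb h (List.drop (j + K + pb.length) S) with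
          | nil => exact ⟨S.length, [], by simp, by omega⟩
          | cons m os =>
            exact ⟨j + K + pb.length + m,
              os.map (fun m' => ((j + K + pb.length + m' : Nat) : Int)) ++
                [((S.length : Nat) : Int)],
              by simp, by omega⟩
        rw [hps0, hbs, pvPairL_cons] at hIH
        simp only [pvAheadL, List.cons.injEq, Prod.mk.injEq] at hIH
        obtain ⟨⟨hp0, -⟩, htail⟩ := hIH
        have hpre' : pb <+: List.drop (j + K) S := by
          have hd2 : List.drop K (List.drop j S) = List.drop (j + K) S := by
            rw [List.drop_drop]
          rwa [hd2] at hpre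
        obtain ⟨X, hX⟩ := hpre'
        have hXd : X = List.drop (j + K + pb.length) S := by
          have h2 : List.drop pb.length (List.drop (j + K) S) = List.drop (j + K + pb.length) S := by
            rw [List.drop_drop]
          rw [← hX, List.drop_left] at h2
          exact h2
        have hslice2 : PySem.List.slice S (some ((j + K : Nat) : Int)) (some ((N : Nat) : Int)) =
            pb ++ PySem.List.slice S (some ((j + K + pb.length : Nat) : Int))
              (some ((N : Nat) : Int)) := by
          rw [PySem.List.slice_natCast, PySem.List.slice_natCast, ← hX, List.take_append,
            List.take_of_length_le (by omega : pb.length ≤ N - (j + K)), hXd]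
          congr 2
          omega
        have hslice1 : PySem.List.slice S (some ((j : Nat) : Int)) (some ((j + K : Nat) : Int)) =
            List.take K (List.drop j S) := by
          rw [PySem.List.slice_natCast]
          congr 1
          omega
        have htk : ((List.take K (List.drop j S)).length : Int) = ((K : Nat) : Int) := by
          simp [List.length_take, List.length_drop]
          omega
        have hblist : (pvOccs pb h (List.drop j S)).map (fun m => ((j + m : Nat) : Int)) ++
            [((S.length : Nat) : Int)] = ((j + K : Nat) : Int) :: ((N : Nat) : Int) :: bs'' := by
          rw [hocc]
          simp only [List.map_cons, List.map_map, List.cons_append]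
          congr 1
          rw [← hbs]
          congr 1
          apply List.map_congr_left
          intro a _
          simp only [Function.comp_apply]
          congr 1
          omega
        rw [hps', hps0, hblist, pvPairL_cons, pvPairL_cons, hslice1, hslice2, ← hp0]
        simp only [pvAheadL, pvAtailL, htk]
        have hc1 : ((j + K : Nat) : Int) = (j : Int) + (K : Int) := by push_cast; ring
        have hc2 : ((j + K + pb.length : Nat) : Int)
            = (j : Int) + (K : Int) + (pb.length : Int) := by push_cast; ring
        rw [hc2] at htail
        rw [hc1, htail]

theorem pvFold1 (pb : List Char) :
    ∀ (ps : List (List Char)) (us : List (String × Int)) (idx : Int) (sidx : Int), 1 ≤ sidx →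
      (PySem.List.enumerate ps sidx).foldl
        (fun (st : List (String × Int) × Int) (p : Int × List Char) =>
          if p.1 > 0 then
            (st.1 ++ [(String.ofList (pb ++ p.2), st.2)], st.2 + PySem.List.len (pb ++ p.2))
          else
            (st.1 ++ [(String.ofList p.2, st.2)], st.2 + PySem.List.len p.2)) (us, idx)
      = (us ++ (pvAtailL pb ps idx).map (fun q => (String.ofList q.1, q.2)),
         idx + ((ps.map (fun p => ((pb.length : Int) + (p.length : Int)))).sum)) := by
  intro ps
  induction ps with
  | nil => intro us idx sidx hs; simp [PySem.List.enumerate_nil, pvAtailL]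
  | cons p ps ih =>
    intro us idx sidx hs
    rw [PySem.List.enumerate_cons]
    simp only [List.foldl_cons]
    rw [if_pos (by omega : sidx > 0)]
    rw [ih _ _ (sidx + 1) (by omega)]
    rw [PySem.List.len_eq]
    have hidx : idx + ((pb ++ p).length : Int) = idx + (pb.length : Int) + (p.length : Int) := by
      push_cast [List.length_append]
      ring
    rw [hidx]
    simp only [pvAtailL, List.map_cons, List.sum_cons, Prod.mk.injEq]
    refine ⟨by simp [List.append_assoc], by ring⟩

theorem pvAInner_eq (pb : List Char) (pieces : List (List Char)) :
    pvAInner pb pieces =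
      (pvAheadL pb pieces 0).map (fun q => (String.ofList q.1, q.2)) := by
  cases pieces with
  | nil => simp [pvAInner, pvAheadL, PySem.List.enumerate_nil]
  | cons p ps =>
    unfold pvAInner
    rw [PySem.List.enumerate_cons]
    simp only [List.foldl_cons]
    rw [if_neg (by omega : ¬ ((0 : Int) > 0))]
    rw [pvFold1 pb ps _ _ ((0 : Int) + 1) (by omega)]
    simp [pvAheadL, PySem.List.len_eq]

theorem pvBSpans_eq (s : List Char) (bs : List Int) :
    pvBSpans s bs = (pvPairL s bs).map (fun q => (String.ofList q.1, q.2)) := by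
  unfold pvBSpans pvPairL
  suffices H : ∀ (l : List (Int × Int)) (acc : List (String × Int)),
      l.foldl (fun spans p =>
          spans ++ [(String.ofList (PySem.List.slice s (some p.1) (some p.2)), p.1)]) acc
        = acc ++ l.map (fun p =>
            (String.ofList (PySem.List.slice s (some p.1) (some p.2)), p.1)) by
    rw [H]
    simp [List.map_map, Function.comp]
  intro l
  induction l with
  | nil => intro acc; simp
  | cons x xs ih =>
    intro acc
    simp only [List.foldl_cons, List.map_cons]
    rw [ih]
    simp [List.append_assoc]

theorem pvBranch_eq (s : List Char) (bc : Char) :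
    pvAInner [bc, ' '] (PySem.Chars.splitOn s [bc, ' ']) =
    pvBSpans s (pvCollect s [bc, ' '] (s.length + 1) (PySem.Chars.find s [bc, ' '])
      [(0 : Int)] ++ [(s.length : Int)]) := by
  have hpb : 0 < ([bc, ' '] : List Char).length := by simp
  have h00 : PySem.Chars.find s [bc, ' '] =
      PySem.Chars.findFrom s [bc, ' '] (((0 : Nat) : Int)) := by
    rw [Nat.cast_zero]
    exact (PySem.Chars.findFrom_zero s [bc, ' ']).symm
  rw [pvSplitOn_eq [bc, ' '] hpb s, pvAInner_eq, h00,
    pvCollect_eq s [bc, ' '] hpb (s.length + 1) 0 [(0 : Int)] (by omega) (by omega),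
    pvBSpans_eq]
  have hkey := pvKey s [bc, ' '] hpb s.length 0 (by omega) (by omega)
  rw [List.drop_zero] at hkey
  simp only [Nat.cast_zero] at hkey
  rw [hkey]
  congr 1

theorem pvLoop_eq (s : List Char) (bl : List Char) : pvALoop s bl = pvBLoop s bl := by
  induction bl with
  | nil => rfl
  | cons bc rest ih =>
    rw [pvALoop, pvBLoop]
    by_cases hc : PySem.Chars.count s [bc, ' '] > 1
    · rw [if_pos hc, if_pos hc]
      exact pvBranch_eq s bc
    · rw [if_neg hc, if_neg hc]
      exact ih

-- ===== VERDICT (by name: the statement is the Claim_ definition above) =====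
theorem split_by_bullets_spec : Claim_equal_split_by_bullets := by
  intro sentence _
  unfold Spec_split_by_bullets split_by_bullets split_by_bullets_alt
  exact pvLoop_eq sentence.toList pvBullets
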